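-- pv_equiv track=rewrite | github.com/alexandredunant/FireScape | 02_Model_Training/train_relative_probability_model.py | create_temporal_attention_groups
-- ===== SOURCE A (Python) =====
-- def create_temporal_attention_groups(feature_names):
--     """Group features into logical categories for attention mechanism."""
--     temporal_groups = {
--         'temp_1d': [], 'temp_short': [], 'temp_medium': [], 'temp_30d': [], 'temp_60d': [],
--         'precip_1d': [], 'precip_short': [], 'precip_medium': [], 'precip_30d': [], 'precip_60d': [],
--         'static_topo': [], 'static_veg': [], 'static_human': [], 'static_other': []
--     }
--
--     for i, name in enumerate(feature_names):
--         name_lower = name.lower()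
--
--         if 't_' in name_lower:
--             if '_60d' in name_lower: temporal_groups['temp_60d'].append(i)
--             elif '_30d' in name_lower: temporal_groups['temp_30d'].append(i)
--             elif '_1d' in name_lower: temporal_groups['temp_1d'].append(i)
--             elif any(x in name_lower for x in ['_3d', '_5d']): temporal_groups['temp_short'].append(i)
--             else: temporal_groups['temp_medium'].append(i)
--         elif 'p_' in name_lower:
--             if '_60d' in name_lower: temporal_groups['precip_60d'].append(i)
--             elif '_30d' in name_lower: temporal_groups['precip_30d'].append(i)
--             elif '_1d' in name_lower: temporal_groups['precip_1d'].append(i)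
--             elif any(x in name_lower for x in ['_3d', '_5d']): temporal_groups['precip_short'].append(i)
--             else: temporal_groups['precip_medium'].append(i)
--         elif any(x in name_lower for x in ['slope', 'aspect', 'northness', 'eastness', 'nasadem', 'tri']):
--             temporal_groups['static_topo'].append(i)
--         elif any(x in name_lower for x in ['treecoverdensity', 'landcover', 'flammability']):
--             temporal_groups['static_veg'].append(i)
--         elif any(x in name_lower for x in ['walking_time', 'distroads']):
--             temporal_groups['static_human'].append(i)
--         else:
--             temporal_groups['static_other'].append(i)
--
--     return {k: v for k, v in temporal_groups.items() if v}
-- ===== SOURCE B (Python) =====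
-- _RULES = [
--     (lambda n: 't_' in n and '_60d' in n, 'temp_60d'),
--     (lambda n: 't_' in n and '_30d' in n, 'temp_30d'),
--     (lambda n: 't_' in n and '_1d' in n, 'temp_1d'),
--     (lambda n: 't_' in n and ('_3d' in n or '_5d' in n), 'temp_short'),
--     (lambda n: 't_' in n, 'temp_medium'),
--     (lambda n: 'p_' in n and '_60d' in n, 'precip_60d'),
--     (lambda n: 'p_' in n and '_30d' in n, 'precip_30d'),
--     (lambda n: 'p_' in n and '_1d' in n, 'precip_1d'),
--     (lambda n: 'p_' in n and ('_3d' in n or '_5d' in n), 'precip_short'),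
--     (lambda n: 'p_' in n, 'precip_medium'),
--     (lambda n: any(x in n for x in ['slope', 'aspect', 'northness', 'eastness', 'nasadem', 'tri']), 'static_topo'),
--     (lambda n: any(x in n for x in ['treecoverdensity', 'landcover', 'flammability']), 'static_veg'),
--     (lambda n: any(x in n for x in ['walking_time', 'distroads']), 'static_human'),
-- ]
--
-- _KEYS = ['temp_1d', 'temp_short', 'temp_medium', 'temp_30d', 'temp_60d',
--          'precip_1d', 'precip_short', 'precip_medium', 'precip_30d', 'precip_60d',
--          'static_topo', 'static_veg', 'static_human', 'static_other']
--
--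
-- def _classify(name_lower):
--     for pred, key in _RULES:
--         if pred(name_lower):
--             return key
--     return 'static_other'
--
--
-- def create_temporal_attention_groups(feature_names):
--     """Group features into logical categories for attention mechanism."""
--     labels = [_classify(name.lower()) for name in feature_names]
--     out = {}
--     for k in _KEYS:
--         idxs = [i for i, lab in enumerate(labels) if lab == k]
--         if idxs:
--             out[k] = idxs
--     return out
-- ===== Notes on version B (the rewrite author's own statement) =====
-- stated objective: idiomatic
-- what changed: A classifies each name with nested if/elif branches and mutates a pre-seeded dict of lists in one pass; B flattens the logic into an ordered (predicate, key) rule table with a first-match classifier, precomputes a label per name, and then gathers the index list for each template key by a per-group scan, keeping only non-empty groups.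
import Mathlib
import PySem

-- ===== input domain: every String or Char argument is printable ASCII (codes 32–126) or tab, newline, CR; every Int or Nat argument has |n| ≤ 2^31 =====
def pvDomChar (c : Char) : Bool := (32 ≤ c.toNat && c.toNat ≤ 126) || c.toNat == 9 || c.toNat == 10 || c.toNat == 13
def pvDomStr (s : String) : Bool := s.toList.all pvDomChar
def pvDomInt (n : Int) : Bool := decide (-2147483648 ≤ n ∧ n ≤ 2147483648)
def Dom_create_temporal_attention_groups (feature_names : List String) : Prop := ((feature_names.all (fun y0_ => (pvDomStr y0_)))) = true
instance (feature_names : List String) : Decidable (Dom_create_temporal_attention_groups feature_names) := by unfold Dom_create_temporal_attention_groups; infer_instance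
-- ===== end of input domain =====

-- B replaces A's single-pass dict-mutating nested-if classifier by an ordered (predicate, key)
-- rule table plus a per-group gather over precomputed labels (objective: idiomatic decomposition).

-- ===== PORT A =====
def create_temporal_attention_groups (feature_names : List String) : List (String × List Int) :=
  let init : PySem.Dict String (List Int) := PySem.Dict.ofList
    [("temp_1d", []), ("temp_short", []), ("temp_medium", []), ("temp_30d", []), ("temp_60d", []),
     ("precip_1d", []), ("precip_short", []), ("precip_medium", []), ("precip_30d", []), ("precip_60d", []),
     ("static_topo", []), ("static_veg", []), ("static_human", []), ("static_other", [])]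
  let final := (PySem.List.enumerate feature_names).foldl (fun d p =>
    let i := p.1
    let nl := PySem.Str.lower p.2
    if PySem.Str.isIn "t_" nl then
      if PySem.Str.isIn "_60d" nl then d.modify "temp_60d" [] (· ++ [i])
      else if PySem.Str.isIn "_30d" nl then d.modify "temp_30d" [] (· ++ [i])
      else if PySem.Str.isIn "_1d" nl then d.modify "temp_1d" [] (· ++ [i])
      else if ["_3d", "_5d"].any (fun x => PySem.Str.isIn x nl) then d.modify "temp_short" [] (· ++ [i])
      else d.modify "temp_medium" [] (· ++ [i])
    else if PySem.Str.isIn "p_" nl then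
      if PySem.Str.isIn "_60d" nl then d.modify "precip_60d" [] (· ++ [i])
      else if PySem.Str.isIn "_30d" nl then d.modify "precip_30d" [] (· ++ [i])
      else if PySem.Str.isIn "_1d" nl then d.modify "precip_1d" [] (· ++ [i])
      else if ["_3d", "_5d"].any (fun x => PySem.Str.isIn x nl) then d.modify "precip_short" [] (· ++ [i])
      else d.modify "precip_medium" [] (· ++ [i])
    else if ["slope", "aspect", "northness", "eastness", "nasadem", "tri"].any (fun x => PySem.Str.isIn x nl) then
      d.modify "static_topo" [] (· ++ [i])
    else if ["treecoverdensity", "landcover", "flammability"].any (fun x => PySem.Str.isIn x nl) then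
      d.modify "static_veg" [] (· ++ [i])
    else if ["walking_time", "distroads"].any (fun x => PySem.Str.isIn x nl) then
      d.modify "static_human" [] (· ++ [i])
    else d.modify "static_other" [] (· ++ [i])) init
  final.items.filter (fun kv => !kv.2.isEmpty)

-- ===== PORT B =====
-- ordered rule table: first matching predicate decides the group key
def pvRules : List ((String → Bool) × String) :=
  [ (fun n => PySem.Str.isIn "t_" n && PySem.Str.isIn "_60d" n, "temp_60d"),
    (fun n => PySem.Str.isIn "t_" n && PySem.Str.isIn "_30d" n, "temp_30d"),
    (fun n => PySem.Str.isIn "t_" n && PySem.Str.isIn "_1d" n, "temp_1d"),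
    (fun n => PySem.Str.isIn "t_" n && (PySem.Str.isIn "_3d" n || PySem.Str.isIn "_5d" n), "temp_short"),
    (fun n => PySem.Str.isIn "t_" n, "temp_medium"),
    (fun n => PySem.Str.isIn "p_" n && PySem.Str.isIn "_60d" n, "precip_60d"),
    (fun n => PySem.Str.isIn "p_" n && PySem.Str.isIn "_30d" n, "precip_30d"),
    (fun n => PySem.Str.isIn "p_" n && PySem.Str.isIn "_1d" n, "precip_1d"),
    (fun n => PySem.Str.isIn "p_" n && (PySem.Str.isIn "_3d" n || PySem.Str.isIn "_5d" n), "precip_short"),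
    (fun n => PySem.Str.isIn "p_" n, "precip_medium"),
    (fun n => ["slope", "aspect", "northness", "eastness", "nasadem", "tri"].any (fun x => PySem.Str.isIn x n), "static_topo"),
    (fun n => ["treecoverdensity", "landcover", "flammability"].any (fun x => PySem.Str.isIn x n), "static_veg"),
    (fun n => ["walking_time", "distroads"].any (fun x => PySem.Str.isIn x n), "static_human") ]

def pvKeys : List String :=
  ["temp_1d", "temp_short", "temp_medium", "temp_30d", "temp_60d",
   "precip_1d", "precip_short", "precip_medium", "precip_30d", "precip_60d",
   "static_topo", "static_veg", "static_human", "static_other"]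

def pvClassifyGo : List ((String → Bool) × String) → String → String
  | [], _ => "static_other"
  | (pred, key) :: rest, nl => if pred nl then key else pvClassifyGo rest nl

def pvClassify (name_lower : String) : String := pvClassifyGo pvRules name_lower

def create_temporal_attention_groups_alt (feature_names : List String) : List (String × List Int) :=
  let labels := feature_names.map (fun name => pvClassify (PySem.Str.lower name))
  pvKeys.foldl (fun out k =>
    let idxs := (PySem.List.enumerate labels).filterMap
      (fun p => if p.2 == k then some p.1 else none)
    if idxs.isEmpty then out else out ++ [(k, idxs)]) []

-- ===== PRECONDITION & SPEC =====
def Spec_create_temporal_attention_groups (feature_names : List String) (out : List (String × List Int)) : Prop := out = create_temporal_attention_groups_alt feature_names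
instance (feature_names : List String) (out : List (String × List Int)) : Decidable (Spec_create_temporal_attention_groups feature_names out) := by unfold Spec_create_temporal_attention_groups; infer_instance

-- ===== CLAIM (what is proved, stated in full; the proofs are below) =====
def Claim_equal_create_temporal_attention_groups : Prop := ∀ (feature_names : List String), Dom_create_temporal_attention_groups feature_names → Spec_create_temporal_attention_groups feature_names (create_temporal_attention_groups feature_names)

-- ===== LEMMAS AND PROOFS =====

-- A's branch logic read off as a key-valued function (proof helper)
def pvKeyOf (nl : String) : String :=
  if PySem.Str.isIn "t_" nl then
    if PySem.Str.isIn "_60d" nl then "temp_60d"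
    else if PySem.Str.isIn "_30d" nl then "temp_30d"
    else if PySem.Str.isIn "_1d" nl then "temp_1d"
    else if ["_3d", "_5d"].any (fun x => PySem.Str.isIn x nl) then "temp_short"
    else "temp_medium"
  else if PySem.Str.isIn "p_" nl then
    if PySem.Str.isIn "_60d" nl then "precip_60d"
    else if PySem.Str.isIn "_30d" nl then "precip_30d"
    else if PySem.Str.isIn "_1d" nl then "precip_1d"
    else if ["_3d", "_5d"].any (fun x => PySem.Str.isIn x nl) then "precip_short"
    else "precip_medium"
  else if ["slope", "aspect", "northness", "eastness", "nasadem", "tri"].any (fun x => PySem.Str.isIn x nl) then "static_topo"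
  else if ["treecoverdensity", "landcover", "flammability"].any (fun x => PySem.Str.isIn x nl) then "static_veg"
  else if ["walking_time", "distroads"].any (fun x => PySem.Str.isIn x nl) then "static_human"
  else "static_other"

def pvInit : PySem.Dict String (List Int) := PySem.Dict.ofList
    [("temp_1d", []), ("temp_short", []), ("temp_medium", []), ("temp_30d", []), ("temp_60d", []),
     ("precip_1d", []), ("precip_short", []), ("precip_medium", []), ("precip_30d", []), ("precip_60d", []),
     ("static_topo", []), ("static_veg", []), ("static_human", []), ("static_other", [])]

def pvGather (feature_names : List String) (k : String) : List Int :=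
  (List.filter (fun p => pvKeyOf (PySem.Str.lower p.2) == k) (PySem.List.enumerate feature_names)).map (fun p => p.1)

theorem pvClassify_eq (nl : String) : pvClassify nl = pvKeyOf nl := by
  simp only [pvClassify, pvRules, pvClassifyGo, pvKeyOf, List.any_cons, List.any_nil, Bool.or_false]
  cases h1 : PySem.Str.isIn "t_" nl <;>
  cases h2 : PySem.Str.isIn "p_" nl <;>
  cases h3 : PySem.Str.isIn "_60d" nl <;>
  cases h4 : PySem.Str.isIn "_30d" nl <;>
  cases h5 : PySem.Str.isIn "_1d" nl <;>
  cases h6 : PySem.Str.isIn "_3d" nl <;>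
  cases h7 : PySem.Str.isIn "_5d" nl <;>
  simp only [h1, h2, h3, h4, h5, h6, h7, Bool.and_true, Bool.and_false, Bool.true_and,
    Bool.false_and, Bool.or_true, Bool.true_or, Bool.or_false, Bool.false_or, if_true, if_false,
    Bool.true_eq_false, Bool.false_eq_true, ite_true, ite_false] <;> rfl

set_option maxHeartbeats 2000000 in
theorem pvKeyOf_mem (nl : String) : pvKeyOf nl ∈ pvKeys := by
  have h : ∀ s : String, s = "temp_1d" ∨ s = "temp_short" ∨ s = "temp_medium" ∨ s = "temp_30d" ∨ s = "temp_60d" ∨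
      s = "precip_1d" ∨ s = "precip_short" ∨ s = "precip_medium" ∨ s = "precip_30d" ∨ s = "precip_60d" ∨
      s = "static_topo" ∨ s = "static_veg" ∨ s = "static_human" ∨ s = "static_other" → s ∈ pvKeys := by
    intro s hs
    simp only [pvKeys, List.mem_cons]
    tauto
  apply h
  unfold pvKeyOf
  split_ifs <;> tauto

theorem pvEnumerate_map {α β : Type} (f : α → β) (xs : List α) (s : Int) :
    PySem.List.enumerate (xs.map f) s = (PySem.List.enumerate xs s).map (fun p => (p.1, f p.2)) := by
  induction xs generalizing s with
  | nil => rfl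
  | cons a t ih => simp [PySem.List.enumerate_cons, ih]

theorem pvFilterMap_if {α β : Type} (l : List α) (q : α → Bool) (f : α → β) :
    l.filterMap (fun x => if q x then some (f x) else none) = (l.filter q).map f := by
  induction l with
  | nil => rfl
  | cons a t ih => by_cases h : q a <;> simp [h, ih]

theorem pvInit_keys : pvInit.keys = pvKeys := by decide

theorem pvMkGetD (k : String) (l : List (String × List Int)) (hl : ∀ p ∈ l, p.2 = ([] : List Int)) :
    (PySem.Dict.mk l).getD k [] = [] := by
  induction l with
  | nil => rfl
  | cons a t ih =>
    rw [PySem.Dict.getD_eq_get?_getD, PySem.Dict.get?_mk_cons]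
    split_ifs with h
    · exact hl a (List.mem_cons_self ..)
    · rw [← PySem.Dict.getD_eq_get?_getD]
      exact ih (fun p hp => hl p (List.mem_cons_of_mem _ hp))

set_option maxHeartbeats 1000000 in
theorem pvInit_getD (k : String) : pvInit.getD k [] = [] := by
  have h : pvInit = (⟨[("temp_1d", []), ("temp_short", []), ("temp_medium", []), ("temp_30d", []), ("temp_60d", []),
     ("precip_1d", []), ("precip_short", []), ("precip_medium", []), ("precip_30d", []), ("precip_60d", []),
     ("static_topo", []), ("static_veg", []), ("static_human", []), ("static_other", [])]⟩ : PySem.Dict String (List Int)) := by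
    apply PySem.Dict.ext; decide
  rw [h]
  exact pvMkGetD k _ (by decide)

theorem pvFoldA_eq (l : List (Int × String)) (d : PySem.Dict String (List Int)) :
    l.foldl (fun d p =>
      let i := p.1
      let nl := PySem.Str.lower p.2
      if PySem.Str.isIn "t_" nl then
        if PySem.Str.isIn "_60d" nl then d.modify "temp_60d" [] (· ++ [i])
        else if PySem.Str.isIn "_30d" nl then d.modify "temp_30d" [] (· ++ [i])
        else if PySem.Str.isIn "_1d" nl then d.modify "temp_1d" [] (· ++ [i])
        else if ["_3d", "_5d"].any (fun x => PySem.Str.isIn x nl) then d.modify "temp_short" [] (· ++ [i])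
        else d.modify "temp_medium" [] (· ++ [i])
      else if PySem.Str.isIn "p_" nl then
        if PySem.Str.isIn "_60d" nl then d.modify "precip_60d" [] (· ++ [i])
        else if PySem.Str.isIn "_30d" nl then d.modify "precip_30d" [] (· ++ [i])
        else if PySem.Str.isIn "_1d" nl then d.modify "precip_1d" [] (· ++ [i])
        else if ["_3d", "_5d"].any (fun x => PySem.Str.isIn x nl) then d.modify "precip_short" [] (· ++ [i])
        else d.modify "precip_medium" [] (· ++ [i])
      else if ["slope", "aspect", "northness", "eastness", "nasadem", "tri"].any (fun x => PySem.Str.isIn x nl) then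
        d.modify "static_topo" [] (· ++ [i])
      else if ["treecoverdensity", "landcover", "flammability"].any (fun x => PySem.Str.isIn x nl) then
        d.modify "static_veg" [] (· ++ [i])
      else if ["walking_time", "distroads"].any (fun x => PySem.Str.isIn x nl) then
        d.modify "static_human" [] (· ++ [i])
      else d.modify "static_other" [] (· ++ [i])) d
    = l.foldl (fun d p => PySem.Dict.modify d (pvKeyOf (PySem.Str.lower p.2)) [] (fun v => v ++ [p.1])) d := by
  induction l generalizing d with
  | nil => rfl
  | cons a t ih =>
    simp only [List.foldl_cons]
    rw [ih]
    congr 1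
    simp only [pvKeyOf]
    split_ifs <;> rfl

theorem pvFold_pair (l : List (Int × String)) (d : PySem.Dict String (List Int)) :
    l.foldl (fun d p => PySem.Dict.modify d (pvKeyOf (PySem.Str.lower p.2)) [] (fun v => v ++ [p.1])) d
    = (l.map (fun p => (pvKeyOf (PySem.Str.lower p.2), p.1))).foldl
        (fun d p => PySem.Dict.modify d p.1 [] (fun x => x ++ [p.2])) d := by
  induction l generalizing d with
  | nil => rfl
  | cons a t ih => simp only [List.foldl_cons, List.map_cons, ih]

theorem pvFold_keys (m : List (String × Int)) (d : PySem.Dict String (List Int)) :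
    (m.foldl (fun d p => PySem.Dict.modify d p.1 [] (fun x => x ++ [p.2])) d).keys
    = PySem.Set.update d.keys (m.map (fun p => p.1)) :=
  PySem.Dict.keys_foldl_modify_key m (fun p => p.1) [] (fun _ p x => x ++ [p.2]) d

theorem pvFold_nodup (m : List (String × Int)) (d : PySem.Dict String (List Int))
    (h : d.keys.Nodup) :
    (m.foldl (fun d p => PySem.Dict.modify d p.1 [] (fun x => x ++ [p.2])) d).keys.Nodup :=
  PySem.Dict.nodup_keys_foldl_modify_key m (fun p => p.1) [] (fun _ p x => x ++ [p.2]) d h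

theorem pvA_char (feature_names : List String) :
    create_temporal_attention_groups feature_names
    = (pvKeys.map (fun k => (k, pvGather feature_names k))).filter (fun kv => !kv.2.isEmpty) := by
  have hI : PySem.Dict.ofList
    [("temp_1d", ([] : List Int)), ("temp_short", []), ("temp_medium", []), ("temp_30d", []), ("temp_60d", []),
     ("precip_1d", []), ("precip_short", []), ("precip_medium", []), ("precip_30d", []), ("precip_60d", []),
     ("static_topo", []), ("static_veg", []), ("static_human", []), ("static_other", [])] = pvInit := rfl
  simp only [create_temporal_attention_groups]
  rw [hI, pvFoldA_eq, pvFold_pair]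
  have hnodup := pvFold_nodup ((PySem.List.enumerate feature_names).map (fun p => (pvKeyOf (PySem.Str.lower p.2), p.1))) pvInit
    (by rw [pvInit_keys]; decide)
  have hkeys : ((((PySem.List.enumerate feature_names).map (fun p => (pvKeyOf (PySem.Str.lower p.2), p.1))).foldl
      (fun d p => PySem.Dict.modify d p.1 [] (fun x => x ++ [p.2])) pvInit)).keys = pvKeys := by
    rw [pvFold_keys, PySem.Set.update_eq_append_filter, pvInit_keys]
    have h0 : (List.filter (fun y => !PySem.Set.contains pvKeys y)
        (PySem.Set.ofList (((PySem.List.enumerate feature_names).map (fun p => (pvKeyOf (PySem.Str.lower p.2), p.1))).map (fun p => p.1)))) = [] := by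
      rw [List.filter_eq_nil_iff]
      intro y hy
      rw [PySem.Set.mem_ofList] at hy
      simp only [List.map_map, List.mem_map, Function.comp] at hy
      obtain ⟨p, -, hp⟩ := hy
      have hm : y ∈ pvKeys := by rw [← hp]; exact pvKeyOf_mem _
      have hc : PySem.Set.contains pvKeys y = true := (PySem.Set.contains_iff _ _).mpr hm
      simp [hc, hm]
    rw [h0, List.append_nil]
  rw [PySem.Dict.items_eq_map_keys _ hnodup [], hkeys]
  congr 1
  apply List.map_congr_left
  intro k _
  rw [PySem.Dict.getD_foldl_modify_append, pvInit_getD, List.nil_append]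
  simp only [pvGather, List.filter_map, List.map_map]
  rfl

theorem pvFoldB_eq (l : List String) (h : String → List Int) (acc : List (String × List Int)) :
    l.foldl (fun out k => if (h k).isEmpty then out else out ++ [(k, h k)]) acc
    = acc ++ (l.map (fun k => (k, h k))).filter (fun kv => !kv.2.isEmpty) := by
  induction l generalizing acc with
  | nil => simp
  | cons a t ih =>
    simp only [List.foldl_cons, List.map_cons, List.filter_cons]
    by_cases he : (h a).isEmpty
    · rw [if_pos he, ih]
      simp [he]
    · rw [if_neg he, ih]
      simp [he, List.append_assoc]

theorem pvB_char (feature_names : List String) :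
    create_temporal_attention_groups_alt feature_names
    = (pvKeys.map (fun k => (k, pvGather feature_names k))).filter (fun kv => !kv.2.isEmpty) := by
  have hg : ∀ k : String, (PySem.List.enumerate (feature_names.map (fun name => pvClassify (PySem.Str.lower name)))).filterMap
      (fun p => if p.2 == k then some p.1 else none) = pvGather feature_names k := by
    intro k
    rw [pvEnumerate_map, List.filterMap_map]
    have hc : ((fun p : Int × String => if p.2 == k then some p.1 else none) ∘
        (fun p : Int × String => (p.1, pvClassify (PySem.Str.lower p.2))))
        = fun p : Int × String => if (pvKeyOf (PySem.Str.lower p.2) == k) then some p.1 else none := by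
      funext p; simp [Function.comp, pvClassify_eq]
    rw [hc, pvFilterMap_if]
    rfl
  have h1 : create_temporal_attention_groups_alt feature_names
      = pvKeys.foldl (fun out k => if (pvGather feature_names k).isEmpty then out
          else out ++ [(k, pvGather feature_names k)]) [] := by
    simp only [create_temporal_attention_groups_alt]
    apply PySem.List.foldl_congr_mem
    intro acc k _
    rw [hg]
  rw [h1, pvFoldB_eq, List.nil_append]

-- ===== VERDICT (by name: the statement is the Claim_ definition above) =====
theorem create_temporal_attention_groups_spec : Claim_equal_create_temporal_attention_groups := by
  intro feature_names _
  unfold Spec_create_temporal_attention_groups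
  rw [pvA_char, pvB_char]
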